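-- pv_equiv track=rewrite | github.com/Heutlett/2021_DISE-O_LOGICO_PROYECTO_1 | Proyecto/hammingcode.py | regla_salta_comprueba
-- ===== SOURCE A (Python) =====
-- def regla_salta_comprueba(n, tamano_final):
--     resultado = []
--     comprueba = 1
--     salta = n - 1
--     while comprueba < tamano_final:
--         comprueba = comprueba + salta
--         for x in range(n):
--             if comprueba <= tamano_final:
--                 resultado.append(comprueba)
--             comprueba += 1
--         salta = n
--     return resultado
-- ===== SOURCE B (Python) =====
-- def regla_salta_comprueba(n, tamano_final):
--     if tamano_final < 2:
--         return []
--     return [i for i in range(1, tamano_final + 1) if (i // n) % 2 == 1]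
-- ===== Notes on version B (the rewrite author's own statement) =====
-- stated objective: simpler
-- what changed: Replaced A's two-level skip/copy state machine (while loop with mutating comprueba/salta and an inner for-range append loop) by a single filtered range pass keeping exactly the i in 1..tamano_final whose block index i//n is odd, with an early [] for tamano_final < 2 where the while loop is never entered.
import Mathlib
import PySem

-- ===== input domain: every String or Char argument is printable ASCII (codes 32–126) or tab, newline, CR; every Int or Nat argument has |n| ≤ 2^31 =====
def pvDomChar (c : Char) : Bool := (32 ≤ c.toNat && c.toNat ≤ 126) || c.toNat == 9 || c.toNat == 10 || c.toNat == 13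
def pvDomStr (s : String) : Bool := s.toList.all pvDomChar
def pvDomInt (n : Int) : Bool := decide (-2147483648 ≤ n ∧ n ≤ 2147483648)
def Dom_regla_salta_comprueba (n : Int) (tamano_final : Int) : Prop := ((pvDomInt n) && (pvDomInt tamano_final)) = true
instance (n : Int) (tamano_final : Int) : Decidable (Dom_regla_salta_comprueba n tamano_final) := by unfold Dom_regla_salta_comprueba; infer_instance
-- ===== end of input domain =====

-- B replaces A's skip/copy state machine by one filtered range pass: i is kept iff its block index i//n is odd (objective: simpler).

-- ===== PORT A =====
-- inner 'for x in range(n)' loop: appends comprueba when ≤ tamano_final, increments it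
def pvInnerA (t : Int) : Nat → Int → List Int → Int × List Int
  | 0, c, acc => (c, acc)
  | k+1, c, acc => pvInnerA t k (c + 1) (if c ≤ t then acc ++ [c] else acc)

-- the while loop; fuel only makes it total (for n ≥ 1 it never runs out — Pre_ excludes n ≤ 0 with tamano_final ≥ 2, where the Python diverges)
def pvLoopA (n t : Int) : Nat → Int → Int → List Int → List Int
  | 0, _, _, acc => acc
  | fuel+1, c, salta, acc =>
    if c < t then
      let s := pvInnerA t n.toNat (c + salta) acc
      pvLoopA n t fuel s.1 n s.2
    else acc

def regla_salta_comprueba (n : Int) (tamano_final : Int) : List Int :=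
  pvLoopA n tamano_final (tamano_final.toNat + 1) 1 (n - 1) []

-- ===== PORT B =====
-- the comprehension's condition: (i // n) % 2 == 1
def pvBlockOdd (n i : Int) : Bool := PySem.Int.mod (PySem.Int.floordiv i n) 2 == 1

def regla_salta_comprueba_alt (n : Int) (tamano_final : Int) : List Int :=
  if tamano_final < 2 then []
  else (PySem.List.pyRange 1 (tamano_final + 1) 1).filter (fun i => pvBlockOdd n i)

-- ===== PRECONDITION & SPEC =====
-- Pre_ excludes n ≤ 0 with tamano_final ≥ 2: there Python A loops forever (and B would divide by zero for n = 0).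
def Pre_regla_salta_comprueba (n : Int) (tamano_final : Int) : Prop := 1 ≤ n ∨ tamano_final < 2
instance (n : Int) (tamano_final : Int) : Decidable (Pre_regla_salta_comprueba n tamano_final) := by unfold Pre_regla_salta_comprueba; infer_instance
def pvWitness_regla_salta_comprueba : Int × Int := (3, 11)

def Spec_regla_salta_comprueba (n : Int) (tamano_final : Int) (out : List Int) : Prop := out = regla_salta_comprueba_alt n tamano_final
instance (n : Int) (tamano_final : Int) (out : List Int) : Decidable (Spec_regla_salta_comprueba n tamano_final out) := by unfold Spec_regla_salta_comprueba; infer_instance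

-- ===== CLAIM (what is proved, stated in full; the proofs are below) =====
def Claim_equal_regla_salta_comprueba : Prop := ∀ (n : Int) (tamano_final : Int), Dom_regla_salta_comprueba n tamano_final → Pre_regla_salta_comprueba n tamano_final → Spec_regla_salta_comprueba n tamano_final (regla_salta_comprueba n tamano_final)

-- ===== LEMMAS AND PROOFS =====

-- the inner for-loop emits the range [c, c+k) filtered by ≤ t, and advances c by k
lemma pvInnerA_eq (t : Int) : ∀ (k : Nat) (c : Int) (acc : List Int),
    pvInnerA t k c acc
      = (c + k, acc ++ (PySem.List.pyRange c (c + k) 1).filter (fun i => decide (i ≤ t))) := by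
  intro k
  induction k with
  | zero => intro c acc; simp [pvInnerA, PySem.List.pyRange_one_eq_nil le_rfl]
  | succ k ih =>
    intro c acc
    have hc : c < c + (k + 1 : Nat) := by push_cast; omega
    rw [pvInnerA, ih, PySem.List.pyRange_one_cons hc]
    push_cast
    simp only [Prod.mk.injEq]
    refine ⟨by ring, ?_⟩
    by_cases h : c ≤ t <;>
      simp [h, List.append_assoc] <;> ring_nf

-- block-index arithmetic: i in the even block [2kn, 2kn+n) fails the test …
lemma pvBlockOdd_false (n k i : Int) (hn : 1 ≤ n) (h1 : 2*k*n ≤ i) (h2 : i < 2*k*n + n) :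
    pvBlockOdd n i = false := by
  have hd : PySem.Int.floordiv i n = 2*k := by
    rw [PySem.Int.floordiv_eq_iff_of_pos (by omega)]
    constructor <;> nlinarith
  simp [pvBlockOdd, hd]

-- … and i in the odd block [2kn+n, 2kn+2n) passes it
lemma pvBlockOdd_true (n k i : Int) (hn : 1 ≤ n) (h1 : 2*k*n + n ≤ i) (h2 : i < 2*k*n + 2*n) :
    pvBlockOdd n i = true := by
  have hd : PySem.Int.floordiv i n = 2*k + 1 := by
    rw [PySem.Int.floordiv_eq_iff_of_pos (by omega)]
    constructor <;> nlinarith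
  simp [pvBlockOdd, hd]

-- once t ≤ 2kn, nothing ≥ 2kn in [1, t] passes the odd-block test
lemma pvFilter_nil (n t k : Int) (hn : 1 ≤ n) (_hk : 0 ≤ k) (ht : t ≤ 2*k*n) :
    (PySem.List.pyRange 1 (t+1) 1).filter (fun i => decide (2*k*n ≤ i) && pvBlockOdd n i) = [] := by
  rw [List.filter_eq_nil_iff]
  intro i hi
  rw [PySem.List.mem_pyRange_one] at hi
  by_cases h : 2*k*n ≤ i
  · have : pvBlockOdd n i = false := pvBlockOdd_false n k i hn h (by omega)
    simp [this]
  · simp [h]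

-- KEY: the remaining-filter splits into the next odd block plus the filter beyond it
lemma pvKey (n t k : Int) (hn : 1 ≤ n) (_hk : 0 ≤ k) :
    (PySem.List.pyRange 1 (t+1) 1).filter (fun i => decide (2*k*n ≤ i) && pvBlockOdd n i)
      = (PySem.List.pyRange (2*k*n + n) (2*(k+1)*n) 1).filter (fun i => decide (i ≤ t))
        ++ (PySem.List.pyRange 1 (t+1) 1).filter (fun i => decide (2*(k+1)*n ≤ i) && pvBlockOdd n i) := by
  have hmn1 : (1:Int) ≤ 2*k*n + n := by nlinarith
  have hkk : 2*(k+1)*n = 2*k*n + 2*n := by ring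
  by_cases hcase : t + 1 ≤ 2*k*n + n
  · -- everything in [1,t] is below the odd block: all three filters are empty
    have h1 : (PySem.List.pyRange 1 (t+1) 1).filter (fun i => decide (2*k*n ≤ i) && pvBlockOdd n i) = [] := by
      rw [List.filter_eq_nil_iff]; intro i hi
      rw [PySem.List.mem_pyRange_one] at hi
      by_cases h : 2*k*n ≤ i
      · simp [pvBlockOdd_false n k i hn h (by omega)]
      · simp [h]
    have h2 : (PySem.List.pyRange (2*k*n + n) (2*(k+1)*n) 1).filter (fun i => decide (i ≤ t)) = [] := by
      rw [List.filter_eq_nil_iff]; intro i hi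
      rw [PySem.List.mem_pyRange_one] at hi
      simp; omega
    have h3 : (PySem.List.pyRange 1 (t+1) 1).filter (fun i => decide (2*(k+1)*n ≤ i) && pvBlockOdd n i) = [] := by
      rw [List.filter_eq_nil_iff]; intro i hi
      rw [PySem.List.mem_pyRange_one] at hi
      have : ¬ (2*(k+1)*n ≤ i) := by omega
      simp [this]
    rw [h1, h2, h3]; rfl
  · -- hcase: ¬ (t + 1 ≤ 2*k*n + n)
    by_cases hcase2 : 2*(k+1)*n ≤ t + 1
    · -- the odd block lies entirely inside [1, t]
      rw [PySem.List.pyRange_one_append 1 (2*k*n + n) (t+1) hmn1 (by omega),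
          PySem.List.pyRange_one_append (2*k*n + n) (2*(k+1)*n) (t+1) (by omega) hcase2,
          ]
      simp only [List.filter_append]
      have h1 : (PySem.List.pyRange 1 (2*k*n + n) 1).filter (fun i => decide (2*k*n ≤ i) && pvBlockOdd n i) = [] := by
        rw [List.filter_eq_nil_iff]; intro i hi
        rw [PySem.List.mem_pyRange_one] at hi
        by_cases h : 2*k*n ≤ i
        · simp [pvBlockOdd_false n k i hn h (by omega)]
        · simp [h]
      have h1' : (PySem.List.pyRange 1 (2*k*n + n) 1).filter (fun i => decide (2*(k+1)*n ≤ i) && pvBlockOdd n i) = [] := by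
        rw [List.filter_eq_nil_iff]; intro i hi
        rw [PySem.List.mem_pyRange_one] at hi
        have : ¬ (2*(k+1)*n ≤ i) := by omega
        simp [this]
      have h2 : (PySem.List.pyRange (2*k*n + n) (2*(k+1)*n) 1).filter (fun i => decide (2*k*n ≤ i) && pvBlockOdd n i)
          = PySem.List.pyRange (2*k*n + n) (2*(k+1)*n) 1 := by
        rw [List.filter_eq_self]; intro i hi
        rw [PySem.List.mem_pyRange_one] at hi
        simp [pvBlockOdd_true n k i hn (by omega) (by omega)]; omega
      have h2' : (PySem.List.pyRange (2*k*n + n) (2*(k+1)*n) 1).filter (fun i => decide (i ≤ t))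
          = PySem.List.pyRange (2*k*n + n) (2*(k+1)*n) 1 := by
        rw [List.filter_eq_self]; intro i hi
        rw [PySem.List.mem_pyRange_one] at hi
        simp; omega
      have h2'' : (PySem.List.pyRange (2*k*n + n) (2*(k+1)*n) 1).filter (fun i => decide (2*(k+1)*n ≤ i) && pvBlockOdd n i) = [] := by
        rw [List.filter_eq_nil_iff]; intro i hi
        rw [PySem.List.mem_pyRange_one] at hi
        have : ¬ (2*(k+1)*n ≤ i) := by omega
        simp [this]
      have h3 : (PySem.List.pyRange (2*(k+1)*n) (t+1) 1).filter (fun i => decide (2*k*n ≤ i) && pvBlockOdd n i)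
          = (PySem.List.pyRange (2*(k+1)*n) (t+1) 1).filter (fun i => decide (2*(k+1)*n ≤ i) && pvBlockOdd n i) := by
        apply List.filter_congr; intro i hi
        rw [PySem.List.mem_pyRange_one] at hi
        have ha : 2*k*n ≤ i := by omega
        have hb : 2*(k+1)*n ≤ i := by omega
        simp [ha, hb]
      rw [h1, h1', h2, h2', h2'', h3]
      simp
    · -- the odd block is cut off at t
      rw [PySem.List.pyRange_one_append 1 (2*k*n + n) (t+1) hmn1 (by omega),
          ]
      simp only [List.filter_append]
      have h1 : (PySem.List.pyRange 1 (2*k*n + n) 1).filter (fun i => decide (2*k*n ≤ i) && pvBlockOdd n i) = [] := by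
        rw [List.filter_eq_nil_iff]; intro i hi
        rw [PySem.List.mem_pyRange_one] at hi
        by_cases h : 2*k*n ≤ i
        · simp [pvBlockOdd_false n k i hn h (by omega)]
        · simp [h]
      have h1' : (PySem.List.pyRange 1 (2*k*n + n) 1).filter (fun i => decide (2*(k+1)*n ≤ i) && pvBlockOdd n i) = [] := by
        rw [List.filter_eq_nil_iff]; intro i hi
        rw [PySem.List.mem_pyRange_one] at hi
        have : ¬ (2*(k+1)*n ≤ i) := by omega
        simp [this]
      have h2 : (PySem.List.pyRange (2*k*n + n) (t+1) 1).filter (fun i => decide (2*k*n ≤ i) && pvBlockOdd n i)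
          = PySem.List.pyRange (2*k*n + n) (t+1) 1 := by
        rw [List.filter_eq_self]; intro i hi
        rw [PySem.List.mem_pyRange_one] at hi
        simp [pvBlockOdd_true n k i hn (by omega) (by omega)]; omega
      have h2' : (PySem.List.pyRange (2*k*n + n) (t+1) 1).filter (fun i => decide (2*(k+1)*n ≤ i) && pvBlockOdd n i) = [] := by
        rw [List.filter_eq_nil_iff]; intro i hi
        rw [PySem.List.mem_pyRange_one] at hi
        have : ¬ (2*(k+1)*n ≤ i) := by omega
        simp [this]
      have hblock : (PySem.List.pyRange (2*k*n + n) (2*(k+1)*n) 1).filter (fun i => decide (i ≤ t))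
          = PySem.List.pyRange (2*k*n + n) (t+1) 1 := by
        rw [PySem.List.pyRange_one_append (2*k*n + n) (t+1) (2*(k+1)*n) (by omega) (by omega),
            ]
        simp only [List.filter_append]
        have ha : (PySem.List.pyRange (2*k*n + n) (t+1) 1).filter (fun i => decide (i ≤ t))
            = PySem.List.pyRange (2*k*n + n) (t+1) 1 := by
          rw [List.filter_eq_self]; intro i hi
          rw [PySem.List.mem_pyRange_one] at hi
          simp; omega
        have hb : (PySem.List.pyRange (t+1) (2*(k+1)*n) 1).filter (fun i => decide (i ≤ t)) = [] := by
          rw [List.filter_eq_nil_iff]; intro i hi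
          rw [PySem.List.mem_pyRange_one] at hi
          simp; omega
        rw [ha, hb]; simp
      rw [h1, h1', h2, h2', hblock]
      simp

-- while-loop invariant: at a loop head with comprueba = 2kn (k ≥ 1), the loop appends
-- exactly the i ∈ [1, t] with 2kn ≤ i whose block index is odd
lemma pvLoopA_inv (n t : Int) (hn : 1 ≤ n) :
    ∀ (fuel : Nat) (k : Int), 1 ≤ k → t - 2*k*n < (fuel : Int) → ∀ (acc : List Int),
      pvLoopA n t fuel (2*k*n) n acc
        = acc ++ (PySem.List.pyRange 1 (t+1) 1).filter (fun i => decide (2*k*n ≤ i) && pvBlockOdd n i) := by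
  intro fuel
  induction fuel with
  | zero =>
    intro k hk hf acc
    rw [pvLoopA, pvFilter_nil n t k hn (by omega) (by push_cast at hf; omega)]
    simp
  | succ fuel ih =>
    intro k hk hf acc
    rw [pvLoopA]
    by_cases hc : 2*k*n < t
    · rw [if_pos hc]
      have hnt : ((n.toNat : Int)) = n := Int.toNat_of_nonneg (by omega)
      rw [pvInnerA_eq t n.toNat (2*k*n + n) acc, hnt]
      have hstate : 2*k*n + n + n = 2*(k+1)*n := by ring
      have h2n : 2*(k+1)*n = 2*k*n + 2*n := by ring
      rw [hstate, ih (k+1) (by omega) (by push_cast at hf ⊢; omega)]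
      rw [List.append_assoc, ← pvKey n t k hn (by omega)]
    · rw [if_neg hc]
      rw [pvFilter_nil n t k hn (by omega) (by omega)]
      simp

-- ===== VERDICT (by name: the statement is the Claim_ definition above) =====
theorem regla_salta_comprueba_spec : Claim_equal_regla_salta_comprueba := by
  intro n t _ hpre
  unfold Spec_regla_salta_comprueba regla_salta_comprueba regla_salta_comprueba_alt
  by_cases ht : t < 2
  · -- loop never entered (comprueba = 1 < t fails); B's guard
    have h1t : ¬ ((1:Int) < t) := by omega
    rw [if_pos ht]
    show pvLoopA n t (t.toNat + 1) 1 (n-1) [] = []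
    rw [pvLoopA, if_neg h1t]
  · rw [if_neg ht]
    have hn : 1 ≤ n := by rcases hpre with h | h; exact h; omega
    show pvLoopA n t (t.toNat + 1) 1 (n-1) [] = _
    rw [pvLoopA, if_pos (by omega : (1:Int) < t)]
    have hnt : ((n.toNat : Int)) = n := Int.toNat_of_nonneg (by omega)
    have h1n : (1:Int) + (n - 1) = 2*0*n + n := by ring
    rw [h1n, pvInnerA_eq t n.toNat (2*0*n + n) [], hnt]
    have hst : 2*0*n + n + n = 2*(0+1)*n := by ring
    have htn : (t.toNat : Int) = t := Int.toNat_of_nonneg (by omega)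
    dsimp only
    rw [hst, pvLoopA_inv n t hn t.toNat (0+1) (by omega) (by omega) _]
    rw [List.nil_append, ← pvKey n t 0 hn le_rfl]
    apply (List.filter_congr _).symm
    intro i hi
    rw [PySem.List.mem_pyRange_one] at hi
    have h0 : (2*0*n ≤ i) := by omega
    simp
    intro _
    omega
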